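-- pv_equiv track=rewrite | github.com/xenadiaa/Splat3Tableturf-RL | tableturf_vision/map_state_detector.py | _recount_labels
-- ===== SOURCE A (Python) =====
-- from typing import Any, Callable, Dict, List, Optional, Set, Tuple
--
-- def _recount_labels(cells: List[Dict]) -> Dict[str, int]:
--     counts = {
--         "p1_fill": 0,
--         "p2_fill": 0,
--         "p1_special": 0,
--         "p2_special": 0,
--         "conflict": 0,
--         "transparent": 0,
--     }
--     for cell in cells:
--         label = str(cell["label"])
--         if label in counts:
--             counts[label] += 1
--     return counts
-- ===== SOURCE B (Python) =====
-- def _recount_labels(cells):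
--     keys = ("p1_fill", "p2_fill", "p1_special", "p2_special",
--             "conflict", "transparent")
--
--     def tally(lo, hi):
--         if hi - lo == 0:
--             return (0, 0, 0, 0, 0, 0)
--         if hi - lo == 1:
--             label = str(cells[lo]["label"])
--             return tuple(1 if k == label else 0 for k in keys)
--         mid = (lo + hi) // 2
--         left = tally(lo, mid)
--         right = tally(mid, hi)
--         return tuple(l + r for l, r in zip(left, right))
--
--     return dict(zip(keys, tally(0, len(cells))))
-- ===== Notes on version B (the rewrite author's own statement) =====
-- stated objective: alternative
-- what changed: B maps each cell's label to a one-hot 6-vector and combines them by divide-and-conquer vector addition over halves of the list, instead of A's sequential loop doing branch-guarded increments into a pre-initialised dict; correct because vector addition is associative and commutative, so the split order does not matter.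
import Mathlib
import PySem

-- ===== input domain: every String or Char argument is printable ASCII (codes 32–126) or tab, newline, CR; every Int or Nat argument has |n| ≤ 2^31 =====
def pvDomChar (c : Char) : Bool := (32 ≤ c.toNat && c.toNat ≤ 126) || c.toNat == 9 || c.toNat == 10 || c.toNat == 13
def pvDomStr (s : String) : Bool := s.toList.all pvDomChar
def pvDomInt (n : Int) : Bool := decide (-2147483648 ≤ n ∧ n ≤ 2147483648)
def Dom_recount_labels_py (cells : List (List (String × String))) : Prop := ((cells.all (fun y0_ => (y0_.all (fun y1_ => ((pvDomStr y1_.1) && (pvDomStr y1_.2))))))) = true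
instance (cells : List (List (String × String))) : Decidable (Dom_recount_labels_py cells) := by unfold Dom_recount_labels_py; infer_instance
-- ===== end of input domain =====

-- B maps each cell's label to a one-hot 6-vector and combines them by divide-and-conquer vector
-- addition over halves, instead of A's sequential branch-guarded dict increments; objective:
-- alternative, same asymptotic cost.

-- ===== PORT A =====
-- loop body of A: label = str(cell["label"]); if label in counts: counts[label] += 1
-- (cell["label"] raising KeyError is excluded by Pre_; the `none` arm is never reached there)
def stepA (counts : PySem.Dict String Int) (cell : List (String × String)) : PySem.Dict String Int :=
  match (PySem.Dict.mk cell).get? "label" with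
  | some label => if counts.contains label then counts.modify label 0 (· + 1) else counts
  | none => counts

def recount_labels_py (cells : List (List (String × String))) : List (String × Int) :=
  let counts0 : PySem.Dict String Int := PySem.Dict.mk
    [("p1_fill", 0), ("p2_fill", 0), ("p1_special", 0), ("p2_special", 0), ("conflict", 0), ("transparent", 0)]
  (cells.foldl stepA counts0).items

-- ===== PORT B =====
-- a 6-vector of bucket counts, in the fixed key order
def addV (a b : Int × Int × Int × Int × Int × Int) : Int × Int × Int × Int × Int × Int :=
  (a.1 + b.1, a.2.1 + b.2.1, a.2.2.1 + b.2.2.1, a.2.2.2.1 + b.2.2.2.1,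
   a.2.2.2.2.1 + b.2.2.2.2.1, a.2.2.2.2.2 + b.2.2.2.2.2)

-- tuple(1 if k == label else 0 for k in keys)   (KeyError excluded by Pre_, so getD "" never fires there)
def oneHotB (cell : List (String × String)) : Int × Int × Int × Int × Int × Int :=
  let label := ((PySem.Dict.mk cell).get? "label").getD ""
  (if "p1_fill" = label then 1 else 0, if "p2_fill" = label then 1 else 0,
   if "p1_special" = label then 1 else 0, if "p2_special" = label then 1 else 0,
   if "conflict" = label then 1 else 0, if "transparent" = label then 1 else 0)

-- tally(lo, hi) of Source B, expressed on the sublist cells[lo:hi]: empty → zeros, singleton → one-hot,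
-- otherwise split at the midpoint and add the two halves' vectors
def tallyB (cs : List (List (String × String))) : Int × Int × Int × Int × Int × Int :=
  match h : cs with
  | [] => (0, 0, 0, 0, 0, 0)
  | [c] => oneHotB c
  | _ :: _ :: _ =>
      addV (tallyB (cs.take (cs.length / 2))) (tallyB (cs.drop (cs.length / 2)))
termination_by cs.length
decreasing_by
  · simp [h, List.length_take]; omega
  · simp [h]; omega

def recount_labels_py_alt (cells : List (List (String × String))) : List (String × Int) :=
  let t := tallyB cells
  [("p1_fill", t.1), ("p2_fill", t.2.1), ("p1_special", t.2.2.1), ("p2_special", t.2.2.2.1),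
   ("conflict", t.2.2.2.2.1), ("transparent", t.2.2.2.2.2)]

-- ===== PRECONDITION & SPEC =====
-- Pre_ excludes exactly the cells with no "label" key, where Python A (and B) raises KeyError.
def Pre_recount_labels_py (cells : List (List (String × String))) : Prop :=
  (cells.all (fun cell => ((PySem.Dict.mk cell).get? "label").isSome)) = true
instance (cells : List (List (String × String))) : Decidable (Pre_recount_labels_py cells) := by
  unfold Pre_recount_labels_py; infer_instance

def pvWitness_recount_labels_py : (List (List (String × String))) :=
  [[("label", "p1_fill")], [("label", "sky"), ("x", "y")], [("label", "conflict")]]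

def Spec_recount_labels_py (cells : List (List (String × String))) (out : List (String × Int)) : Prop := out = recount_labels_py_alt cells
instance (cells : List (List (String × String))) (out : List (String × Int)) : Decidable (Spec_recount_labels_py cells out) := by unfold Spec_recount_labels_py; infer_instance

-- ===== CLAIM (what is proved, stated in full; the proofs are below) =====
def Claim_equal_recount_labels_py : Prop := ∀ (cells : List (List (String × String))), Dom_recount_labels_py cells → Pre_recount_labels_py cells → Spec_recount_labels_py cells (recount_labels_py cells)

-- ===== LEMMAS AND PROOFS =====

def labelsOf (cells : List (List (String × String))) : List String :=
  cells.map (fun cell => ((PySem.Dict.mk cell).get? "label").getD "")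

def vecOf (ls : List String) : Int × Int × Int × Int × Int × Int :=
  ((ls.count "p1_fill" : Int), (ls.count "p2_fill" : Int), (ls.count "p1_special" : Int),
   (ls.count "p2_special" : Int), (ls.count "conflict" : Int), (ls.count "transparent" : Int))

lemma vecOf_append (a b : List String) : vecOf (a ++ b) = addV (vecOf a) (vecOf b) := by
  simp [vecOf, addV, List.count_append]

lemma count_single (k l : String) : (((([l] : List String).count k : Nat)) : Int) = if k = l then 1 else 0 := by
  by_cases h : k = l
  · subst h; simp
  · simp [h, Ne.symm h]

lemma tallyB_eq (cs : List (List (String × String))) : tallyB cs = vecOf (labelsOf cs) := by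
  fun_induction tallyB cs with
  | case1 => simp [vecOf, labelsOf]
  | case2 c =>
      simp only [labelsOf, List.map_cons, List.map_nil, vecOf, oneHotB, count_single]
  | case3 c1 c2 rest ih1 ih2 =>
      rw [ih1, ih2, ← vecOf_append]
      have : labelsOf ((c1 :: c2 :: rest).take ((c1 :: c2 :: rest).length / 2))
            ++ labelsOf ((c1 :: c2 :: rest).drop ((c1 :: c2 :: rest).length / 2))
          = labelsOf (c1 :: c2 :: rest) := by
        simp [labelsOf]
      rw [this]

lemma keys_stepA (d : PySem.Dict String Int) (c : List (String × String)) :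
    (stepA d c).keys = d.keys := by
  unfold stepA
  cases h : (PySem.Dict.mk c).get? "label" with
  | none => rfl
  | some l =>
      simp only
      by_cases hc : d.contains l = true
      · simp [PySem.Dict.keys_modify, hc, PySem.Dict.keys_insert_of_contains]
      · simp [hc]

lemma foldA_keys (cells : List (List (String × String))) (d : PySem.Dict String Int) :
    (cells.foldl stepA d).keys = d.keys := by
  induction cells generalizing d with
  | nil => rfl
  | cons c rest ih => simp [List.foldl, ih, keys_stepA]

lemma foldA_getD (cells : List (List (String × String))) (d : PySem.Dict String Int) (k : String)
    (hk : d.contains k = true)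
    (hpre : (cells.all (fun cell => ((PySem.Dict.mk cell).get? "label").isSome)) = true) :
    (cells.foldl stepA d).getD k 0 = d.getD k 0 + ((labelsOf cells).count k : Int) := by
  induction cells generalizing d with
  | nil => simp [labelsOf]
  | cons c rest ih =>
      simp only [List.all_cons, Bool.and_eq_true] at hpre
      obtain ⟨hc, hrest⟩ := hpre
      obtain ⟨l, hl⟩ := Option.isSome_iff_exists.mp hc
      have hstep_contains : (stepA d c).contains k = true := by
        rw [PySem.Dict.contains_eq_decide_mem_keys, keys_stepA,
          ← PySem.Dict.contains_eq_decide_mem_keys]; exact hk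
      have hlabels : labelsOf (c :: rest) = l :: labelsOf rest := by
        simp [labelsOf, hl]
      rw [List.foldl_cons, ih _ hstep_contains hrest, hlabels]
      by_cases hlk : l = k
      · subst hlk
        have : stepA d c = d.modify l 0 (· + 1) := by
          unfold stepA; rw [hl]; simp [hk]
        rw [this, PySem.Dict.getD_modify_self]
        simp
        ring
      · have : (stepA d c).getD k 0 = d.getD k 0 := by
          unfold stepA; rw [hl]
          by_cases hcl : d.contains l = true
          · simp only [hcl, if_true]
            rw [PySem.Dict.getD_modify]
            simp [Ne.symm hlk]
          · simp [hcl]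
        rw [this]
        simp [hlk]

-- ===== VERDICT (by name: the statement is the Claim_ definition above) =====
theorem recount_labels_py_spec : Claim_equal_recount_labels_py := by
  intro cells _hdom hpre
  unfold Spec_recount_labels_py recount_labels_py recount_labels_py_alt
  simp only
  rw [tallyB_eq]
  have hkeys : ((cells.foldl stepA (PySem.Dict.mk
      [("p1_fill", 0), ("p2_fill", 0), ("p1_special", 0), ("p2_special", 0), ("conflict", 0), ("transparent", 0)])).keys)
      = ["p1_fill", "p2_fill", "p1_special", "p2_special", "conflict", "transparent"] := by
    rw [foldA_keys]; rfl
  have hnd : ((cells.foldl stepA (PySem.Dict.mk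
      [("p1_fill", 0), ("p2_fill", 0), ("p1_special", 0), ("p2_special", 0), ("conflict", 0), ("transparent", 0)])).keys).Nodup := by
    rw [hkeys]; decide
  rw [PySem.Dict.items_eq_map_keys _ hnd 0, hkeys]
  simp only [List.map_cons, List.map_nil]
  rw [foldA_getD cells _ "p1_fill" rfl hpre, foldA_getD cells _ "p2_fill" rfl hpre,
    foldA_getD cells _ "p1_special" rfl hpre, foldA_getD cells _ "p2_special" rfl hpre,
    foldA_getD cells _ "conflict" rfl hpre, foldA_getD cells _ "transparent" rfl hpre]
  simp [vecOf]
  decide
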